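-- pv_equiv track=rewrite | github.com/DChells/crosspoint-x4-chess | tools/generate_chess_sprites.py | _outline_from_filled
-- ===== SOURCE A (Python) =====
-- def _erode(mask: list[list[bool]], iterations: int) -> list[list[bool]]:
--     h = len(mask)
--     w = len(mask[0])
--     cur = [row[:] for row in mask]
--     for _ in range(iterations):
--         nxt = [[False for _ in range(w)] for _ in range(h)]
--         for y in range(h):
--             for x in range(w):
--                 if not cur[y][x]:
--                     continue
--                 ok = True
--                 for dy in (-1, 0, 1):
--                     for dx in (-1, 0, 1):
--                         yy = y + dy
--                         xx = x + dx
--                         if yy < 0 or yy >= h or xx < 0 or xx >= w or not cur[yy][xx]: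
--                             ok = False
--                             break
--                     if not ok:
--                         break
--                 nxt[y][x] = ok
--         cur = nxt
--     return cur
--
-- def _outline_from_filled(filled: list[list[bool]], thickness: int) -> list[list[bool]]:
--     eroded = _erode(filled, thickness)
--     h = len(filled)
--     w = len(filled[0])
--     out = [[False for _ in range(w)] for _ in range(h)]
--     for y in range(h):
--         for x in range(w):
--             out[y][x] = filled[y][x] and (not eroded[y][x])
--     return out
-- ===== SOURCE B (Python) =====
-- def _window_all(bits, t):
--     # ok[x] = window [x-t, x+t] lies inside bits and is all True (prefix sums, O(n))
--     n = len(bits)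
--     p = [0]
--     for b in bits:
--         p.append(p[-1] + (1 if b else 0))
--     return [x >= t and x + t < n and p[x + t + 1] - p[x - t] == 2 * t + 1
--             for x in range(n)]
--
-- def _outline_from_filled(filled, thickness):
--     h = len(filled)
--     w = len(filled[0])
--     t = max(thickness, 0)
--     rows = [_window_all(row[:w], t) for row in filled]          # horizontal pass
--     cols = [_window_all(list(col), t) for col in zip(*rows)]    # vertical pass; cols[x][y] = eroded
--     return [[filled[y][x] and not cols[x][y] for x in range(w)] for y in range(h)]
-- ===== Notes on version B (the rewrite author's own statement) =====
-- stated objective: faster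
-- what changed: Replaces the thickness-fold of 3x3 erosion sweeps with a separable sliding-window test: one prefix-sum pass per row and one per column decide for every cell whether its full (2t+1)x(2t+1) Chebyshev neighbourhood is inside and filled, so the work is O(h*w) independent of thickness.
import Mathlib
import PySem

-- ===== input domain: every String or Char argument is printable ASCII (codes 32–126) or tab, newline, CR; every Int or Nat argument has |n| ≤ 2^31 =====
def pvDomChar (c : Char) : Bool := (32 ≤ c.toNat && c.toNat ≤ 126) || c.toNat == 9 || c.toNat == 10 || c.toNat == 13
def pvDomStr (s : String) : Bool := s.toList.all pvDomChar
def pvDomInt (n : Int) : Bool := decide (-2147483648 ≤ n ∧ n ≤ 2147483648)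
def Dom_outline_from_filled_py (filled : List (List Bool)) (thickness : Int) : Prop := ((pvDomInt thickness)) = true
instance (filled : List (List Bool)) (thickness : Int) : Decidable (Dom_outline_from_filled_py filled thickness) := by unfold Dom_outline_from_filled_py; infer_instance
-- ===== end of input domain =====

-- B replaces the thickness-fold of 3x3 erosion sweeps by a separable prefix-sum window test
-- (one pass over rows, one over columns), computing the same outline in time independent of thickness.

-- ===== PORT A =====
-- one iteration of _erode's inner sweep (the dy/dx loops with break are the short-circuit `all` over (-1,0,1))
def pyErodeStep (h w : Nat) (cur : List (List Bool)) : List (List Bool) :=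
  (List.range h).map (fun y => (List.range w).map (fun x =>
    if !((cur.getD y []).getD x false) then false
    else ([-1, 0, 1] : List Int).all (fun dy => ([-1, 0, 1] : List Int).all (fun dx =>
      let yy : Int := (y : Int) + dy
      let xx : Int := (x : Int) + dx
      !(decide (yy < 0) || decide ((h : Int) ≤ yy) || decide (xx < 0) || decide ((w : Int) ≤ xx) ||
        !((cur.getD yy.toNat []).getD xx.toNat false))))))

def pyErode (mask : List (List Bool)) (iterations : Int) : List (List Bool) :=
  (List.range iterations.toNat).foldl
    (fun cur _ => pyErodeStep mask.length (mask.headD []).length cur)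
    (mask.map (fun r => r))

def outline_from_filled_py (filled : List (List Bool)) (thickness : Int) : List (List Bool) :=
  let eroded := pyErode filled thickness
  (List.range filled.length).map (fun y =>
    (List.range (filled.headD []).length).map (fun x =>
      ((filled.getD y []).getD x false) && !((eroded.getD y []).getD x false)))

-- ===== PORT B =====
-- _window_all: ok[x] iff window [x-t, x+t] lies inside bits and is all true, via prefix sums
def windowAll (bits : List Bool) (t : Int) : List Bool :=
  let n := bits.length
  let p : List Int := bits.scanl (fun s b => s + (if b then 1 else 0)) 0
  (List.range n).map (fun (x : Nat) =>
    decide (t ≤ (x : Int)) && decide ((x : Int) + t < (n : Int)) &&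
    (p.getD (x + t.toNat + 1) 0 - p.getD (x - t.toNat) 0 == 2 * t + 1))

def outline_from_filled_py_alt (filled : List (List Bool)) (thickness : Int) : List (List Bool) :=
  let h := filled.length
  let w := (filled.headD []).length
  let t : Int := max thickness 0
  let rows := filled.map (fun row => windowAll (PySem.List.slice row none (some (w : Int))) t)
  -- zip(*rows): rows is rectangular (h rows of exactly w cells), so column x is entry x of each row
  let cols := (List.range w).map (fun x => windowAll (rows.map (fun r => r.getD x false)) t)
  (List.range h).map (fun y => (List.range w).map (fun x =>
    ((filled.getD y []).getD x false) && !((cols.getD x []).getD y false)))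

-- ===== PRECONDITION & SPEC =====
-- Pre_ excludes exactly the inputs where A raises an IndexError: an empty grid (filled[0])
-- and grids with a row shorter than row 0 (scanned at row 0's width); B raises there too.
def Pre_outline_from_filled_py (filled : List (List Bool)) (thickness : Int) : Prop :=
  filled ≠ [] ∧ ∀ row ∈ filled, (filled.headD []).length ≤ row.length

instance (filled : List (List Bool)) (thickness : Int) : Decidable (Pre_outline_from_filled_py filled thickness) := by
  unfold Pre_outline_from_filled_py; infer_instance

def pvWitness_outline_from_filled_py : List (List Bool) × Int :=
  ([[true, true, true], [true, true, true], [true, true, true]], 1)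

def Spec_outline_from_filled_py (filled : List (List Bool)) (thickness : Int) (out : List (List Bool)) : Prop := out = outline_from_filled_py_alt filled thickness
instance (filled : List (List Bool)) (thickness : Int) (out : List (List Bool)) : Decidable (Spec_outline_from_filled_py filled thickness out) := by unfold Spec_outline_from_filled_py; infer_instance

-- ===== CLAIM (what is proved, stated in full; the proofs are below) =====
def Claim_equal_outline_from_filled_py : Prop := ∀ (filled : List (List Bool)) (thickness : Int), Dom_outline_from_filled_py filled thickness → Pre_outline_from_filled_py filled thickness → Spec_outline_from_filled_py filled thickness (outline_from_filled_py filled thickness)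

-- ===== LEMMAS AND PROOFS =====

-- the cell value grid[y][x] (false off the grid)
def gval (g : List (List Bool)) (y x : Nat) : Bool := (g.getD y []).getD x false

-- "the full (2k+1)×(2k+1) Chebyshev ball around (y,x) is inside the h×w grid and filled"
def Gp (filled : List (List Bool)) (h w k : Nat) (y x : Int) : Prop :=
  ∀ a b : Int, |a| ≤ (k : Int) → |b| ≤ (k : Int) →
    0 ≤ y + a ∧ y + a < (h : Int) ∧ 0 ≤ x + b ∧ x + b < (w : Int) ∧
      gval filled (y + a).toNat (x + b).toNat = true

theorem all_pm_one {f : Int → Bool} :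
    (([-1, 0, 1] : List Int).all f = true) ↔ ∀ d : Int, |d| ≤ 1 → f d = true := by
  simp only [List.all_cons, List.all_nil, Bool.and_eq_true, Bool.and_true]
  constructor
  · rintro ⟨h1, h2, h3⟩ d hd
    have : d = -1 ∨ d = 0 ∨ d = 1 := by rw [abs_le] at hd; omega
    rcases this with h | h | h <;> simp [h, h1, h2, h3]
  · intro H
    exact ⟨H _ (by decide), H _ (by decide), H _ (by decide)⟩

theorem Gp_succ (filled : List (List Bool)) (h w k : Nat) (y x : Int) :
    Gp filled h w (k + 1) y x ↔
      ∀ dy dx : Int, |dy| ≤ 1 → |dx| ≤ 1 →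
        (0 ≤ y + dy ∧ y + dy < (h : Int) ∧ 0 ≤ x + dx ∧ x + dx < (w : Int)) ∧
          Gp filled h w k (y + dy) (x + dx) := by
  constructor
  · intro H dy dx hdy hdx
    rw [abs_le] at hdy hdx
    refine ⟨?_, ?_⟩
    · have := H dy dx (by rw [abs_le]; push_cast; omega) (by rw [abs_le]; push_cast; omega)
      exact ⟨this.1, this.2.1, this.2.2.1, this.2.2.2.1⟩
    · intro a b ha hb
      rw [abs_le] at ha hb
      have := H (dy + a) (dx + b) (by rw [abs_le]; push_cast; omega) (by rw [abs_le]; push_cast; omega)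
      simpa [add_assoc] using this
  · intro H a b ha hb
    rw [abs_le] at ha hb
    set dy : Int := if 0 < a then 1 else if a < 0 then -1 else 0 with hdy
    set dx : Int := if 0 < b then 1 else if b < 0 then -1 else 0 with hdx
    have h1 : |dy| ≤ 1 := by rw [abs_le, hdy]; split_ifs <;> omega
    have h2 : |dx| ≤ 1 := by rw [abs_le, hdx]; split_ifs <;> omega
    have := (H dy dx h1 h2).2 (a - dy) (b - dx)
      (by rw [abs_le, hdy]; split_ifs <;> omega)
      (by rw [abs_le, hdx]; split_ifs <;> omega)
    have e1 : y + dy + (a - dy) = y + a := by ring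
    have e2 : x + dx + (b - dx) = x + b := by ring
    rwa [e1, e2] at this

theorem Gp_zero (filled : List (List Bool)) (h w : Nat) (y x : Nat) (hy : y < h) (hx : x < w) :
    Gp filled h w 0 (y : Int) (x : Int) ↔ gval filled y x = true := by
  constructor
  · intro H
    have := H 0 0 (by simp) (by simp)
    simpa using this.2.2.2.2
  · intro H a b ha hb
    have ha0 : a = 0 := by rw [abs_le] at ha; omega
    have hb0 : b = 0 := by rw [abs_le] at hb; omega
    subst ha0; subst hb0
    refine ⟨by omega, by push_cast; omega, by omega, by push_cast; omega, by simpa using H⟩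

theorem Gp_nested (filled : List (List Bool)) (h w k : Nat) (y x : Nat) :
    Gp filled h w k (y : Int) (x : Int) ↔
      ∀ a : Int, |a| ≤ (k : Int) →
        0 ≤ (y : Int) + a ∧ (y : Int) + a < (h : Int) ∧
          ∀ b : Int, |b| ≤ (k : Int) →
            0 ≤ (x : Int) + b ∧ (x : Int) + b < (w : Int) ∧
              gval filled ((y : Int) + a).toNat ((x : Int) + b).toNat = true := by
  constructor
  · intro H a ha
    have h0 := H a 0 ha (by simp)
    exact ⟨h0.1, h0.2.1, fun b hb => ⟨(H a b ha hb).2.2.1, (H a b ha hb).2.2.2.1, (H a b ha hb).2.2.2.2⟩⟩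
  · intro H a b ha hb
    obtain ⟨hy1, hy2, hin⟩ := H a ha
    obtain ⟨hx1, hx2, hv⟩ := hin b hb
    exact ⟨hy1, hy2, hx1, hx2, hv⟩

theorem step_spec (filled cur : List (List Bool)) (h w k : Nat)
    (hcur : ∀ y x : Nat, y < h → x < w → (gval cur y x = true ↔ Gp filled h w k (y : Int) (x : Int))) :
    ∀ y x : Nat, y < h → x < w →
      (gval (pyErodeStep h w cur) y x = true ↔ Gp filled h w (k + 1) (y : Int) (x : Int)) := by
  intro y x hy hx
  have hcell : gval (pyErodeStep h w cur) y x
      = (if !(gval cur y x) then false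
         else ([-1, 0, 1] : List Int).all (fun dy => ([-1, 0, 1] : List Int).all (fun dx =>
           !(decide ((y : Int) + dy < 0) || decide ((h : Int) ≤ (y : Int) + dy) ||
             decide ((x : Int) + dx < 0) || decide ((w : Int) ≤ (x : Int) + dx) ||
             !((cur.getD ((y : Int) + dy).toNat []).getD ((x : Int) + dx).toNat false))))) := by
    unfold pyErodeStep gval
    rw [PySem.List.getD_map_range _ h y _ hy, PySem.List.getD_map_range _ w x _ hx]
  have hinner : ∀ dy dx : Int, |dy| ≤ 1 → |dx| ≤ 1 →
      ((!(decide ((y : Int) + dy < 0) || decide ((h : Int) ≤ (y : Int) + dy) ||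
          decide ((x : Int) + dx < 0) || decide ((w : Int) ≤ (x : Int) + dx) ||
          !((cur.getD ((y : Int) + dy).toNat []).getD ((x : Int) + dx).toNat false))) = true ↔
        ((0 ≤ (y : Int) + dy ∧ (y : Int) + dy < (h : Int) ∧ 0 ≤ (x : Int) + dx ∧ (x : Int) + dx < (w : Int)) ∧
          Gp filled h w k ((y : Int) + dy) ((x : Int) + dx))) := by
    intro dy dx _ _
    simp only [Bool.not_or, Bool.and_eq_true, Bool.not_not, Bool.not_eq_true',
      decide_eq_false_iff_not, not_lt, not_le]
    constructor
    · rintro ⟨⟨⟨⟨a1, a2⟩, a3⟩, a4⟩, hv⟩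
      have hyn : ((y : Int) + dy).toNat < h := by omega
      have hxn : ((x : Int) + dx).toNat < w := by omega
      have := (hcur _ _ hyn hxn).mp hv
      rw [Int.toNat_of_nonneg (by omega), Int.toNat_of_nonneg (by omega)] at this
      exact ⟨⟨by omega, by omega, by omega, by omega⟩, this⟩
    · rintro ⟨⟨b1, b2, b3, b4⟩, hg⟩
      have hyn : ((y : Int) + dy).toNat < h := by omega
      have hxn : ((x : Int) + dx).toNat < w := by omega
      refine ⟨⟨⟨⟨by omega, by omega⟩, by omega⟩, by omega⟩, ?_⟩
      apply (hcur _ _ hyn hxn).mpr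
      rwa [Int.toNat_of_nonneg (by omega), Int.toNat_of_nonneg (by omega)]
  rw [hcell, Gp_succ]
  constructor
  · intro hcellT dy dx hdy hdx
    by_cases hc : gval cur y x = true
    · rw [hc] at hcellT
      simp only [Bool.not_true, Bool.false_eq_true, if_false] at hcellT
      have := all_pm_one.mp hcellT dy hdy
      exact (hinner dy dx hdy hdx).mp (all_pm_one.mp this dx hdx)
    · rw [Bool.not_eq_true] at hc
      rw [hc] at hcellT
      simp at hcellT
  · intro H
    have hc : gval cur y x = true := by
      have := (H 0 0 (by decide) (by decide)).2
      rw [add_zero, add_zero] at this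
      exact (hcur y x hy hx).mpr this
    rw [hc]
    simp only [Bool.not_true, Bool.false_eq_true, if_false]
    rw [all_pm_one]
    intro dy hdy
    rw [all_pm_one]
    intro dx hdx
    exact (hinner dy dx hdy hdx).mpr (H dy dx hdy hdx)

theorem erode_spec (filled : List (List Bool)) (h w k : Nat) :
    ∀ y x : Nat, y < h → x < w →
      (gval ((List.range k).foldl (fun cur _ => pyErodeStep h w cur) (filled.map (fun r => r))) y x = true
        ↔ Gp filled h w k (y : Int) (x : Int)) := by
  induction k with
  | zero =>
    intro y x hy hx
    simp only [List.range_zero, List.foldl_nil]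
    rw [List.map_id']
    exact (Gp_zero filled h w y x hy hx).symm
  | succ k ih =>
    intro y x hy hx
    rw [List.range_succ, List.foldl_append, List.foldl_cons, List.foldl_nil]
    exact step_spec filled _ h w k ih y x hy hx

theorem scanl_getD (bits : List Bool) (a : Int) (i : Nat) (hi : i ≤ bits.length) :
    (bits.scanl (fun s b => s + (if b then 1 else 0)) a).getD i 0
      = a + ((bits.take i).countP id : Int) := by
  induction bits generalizing a i with
  | nil => simp_all
  | cons c cs ih =>
    rw [List.scanl_cons]
    cases i with
    | zero => simp
    | succ j =>
      simp only [List.getD_cons_succ, List.take_succ_cons, List.countP_cons]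
      rw [ih _ j (by simpa using hi)]
      by_cases hc : c <;> simp [hc] <;> ring

theorem count_diff (bits : List Bool) (a b : Nat) (hab : a ≤ b) (hbn : b ≤ bits.length) :
    (((bits.take b).countP id : Int) - ((bits.take a).countP id : Int) = ((b : Int) - (a : Int))
      ↔ ∀ i : Nat, a ≤ i → i < b → bits[i]? = some true) := by
  have hsplit : bits.take b = bits.take a ++ (bits.take b).drop a := by
    conv_lhs => rw [← List.take_append_drop a (bits.take b)]
    rw [List.take_take, Nat.min_eq_left hab]
  set seg := (bits.take b).drop a with hseg
  have hlseg : seg.length = b - a := by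
    rw [hseg, List.length_drop, List.length_take]
    omega
  have hsegget : ∀ i : Nat, seg[i]? = if i < b - a then bits[a + i]? else none := by
    intro i
    rw [hseg, List.getElem?_drop, List.getElem?_take]
    by_cases h : a + i < b
    · rw [if_pos h, if_pos (by omega)]
    · rw [if_neg h, if_neg (by omega)]
  have step1 : ((bits.take b).countP id : Int) - ((bits.take a).countP id : Int)
      = (seg.countP id : Int) := by
    rw [hsplit, List.countP_append]
    push_cast
    ring
  rw [step1]
  have step2 : ((seg.countP id : Int) = ((b : Int) - (a : Int))) ↔ seg.countP id = seg.length := by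
    have := @List.countP_le_length _ id seg
    omega
  rw [step2, List.countP_eq_length]
  constructor
  · intro H i hai hib
    have hi' : i - a < b - a := by omega
    have := hsegget (i - a)
    rw [if_pos hi'] at this
    have hmm : bits[a + (i - a)]? = some true := by
      rw [← this]
      have hlt : i - a < seg.length := by omega
      rw [List.getElem?_eq_getElem hlt]
      have := H seg[i - a] (List.getElem_mem hlt)
      simp only [id] at this
      simp [this]
    have : a + (i - a) = i := by omega
    rwa [this] at hmm
  · intro H m hm
    obtain ⟨i, hi⟩ := List.mem_iff_getElem?.mp hm
    have hilen : i < seg.length := by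
      rcases List.getElem?_eq_some_iff.mp hi with ⟨h', _⟩
      exact h'
    rw [hsegget i, if_pos (by omega)] at hi
    have := H (a + i) (by omega) (by omega)
    rw [this] at hi
    simpa using (Option.some.inj hi).symm

theorem windowAll_spec (bits : List Bool) (T : Nat) (x : Nat) (hx : x < bits.length) :
    ((windowAll bits (T : Int)).getD x false = true ↔
      ∀ j : Int, |j| ≤ (T : Int) → 0 ≤ (x : Int) + j ∧ (x : Int) + j < (bits.length : Int) ∧
        bits.getD ((x : Int) + j).toNat false = true) := by
  simp only [windowAll]
  rw [PySem.List.getD_map_range _ bits.length x _ hx]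
  simp only [Int.toNat_natCast, Bool.and_eq_true, decide_eq_true_eq, beq_iff_eq]
  constructor
  · rintro ⟨⟨h1, h2⟩, h3⟩
    have hTx : T ≤ x := by omega
    rw [scanl_getD _ _ _ (by omega), scanl_getD _ _ _ (by omega)] at h3
    have hcd : ((bits.take (x + T + 1)).countP id : Int) - ((bits.take (x - T)).countP id : Int)
        = (((x + T + 1 : Nat) : Int) - ((x - T : Nat) : Int)) := by
      push_cast [Nat.cast_sub hTx] at h3 ⊢
      omega
    have hall := (count_diff bits (x - T) (x + T + 1) (by omega) (by omega)).mp hcd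
    intro j hj
    rw [abs_le] at hj
    refine ⟨by omega, by omega, ?_⟩
    have hjn : ((x : Int) + j).toNat < bits.length := by omega
    have := hall ((x : Int) + j).toNat (by omega) (by omega)
    rw [List.getD_eq_getElem?_getD, this]
    rfl
  · intro H
    have h1 : (T : Int) ≤ (x : Int) := by
      have := (H (-(T : Int)) (by rw [abs_le]; omega)).1
      omega
    have h2 : (x : Int) + (T : Int) < (bits.length : Int) :=
      (H (T : Int) (by rw [abs_le]; omega)).2.1
    have hTx : T ≤ x := by omega
    refine ⟨⟨h1, h2⟩, ?_⟩
    rw [scanl_getD _ _ _ (by omega), scanl_getD _ _ _ (by omega)]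
    have hall : ∀ i : Nat, x - T ≤ i → i < x + T + 1 → bits[i]? = some true := by
      intro i hai hib
      set j : Int := (i : Int) - (x : Int) with hj
      have := (H j (by rw [abs_le, hj]; omega)).2.2
      have hto : ((x : Int) + j).toNat = i := by omega
      rw [hto, List.getD_eq_getElem?_getD] at this
      have hilen : i < bits.length := by omega
      rw [List.getElem?_eq_getElem hilen] at this ⊢
      simpa using this
    have := (count_diff bits (x - T) (x + T + 1) (by omega) (by omega)).mpr hall
    push_cast [Nat.cast_sub hTx] at this ⊢
    omega

theorem getD_map_lt {α β : Type} (f : α → β) (l : List α) (i : Nat) (d : β) (h : i < l.length) :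
    (l.map f).getD i d = f l[i] := by
  rw [List.getD_eq_getElem _ _ (by simpa using h), List.getElem_map]

theorem getD_map_map {α β γ : Type} (g : α → β) (f : β → γ) (l : List α) (i : Nat) (d : γ)
    (h : i < l.length) : ((l.map g).map f).getD i d = f (g l[i]) := by
  rw [getD_map_lt f (l.map g) i d (by simpa using h), List.getElem_map]

-- B's eroded bit at an in-range cell is exactly the Chebyshev-ball predicate
theorem alt_eroded_spec (filled : List (List Bool)) (w T : Nat)
    (hpre : ∀ row ∈ filled, w ≤ row.length)
    (y x : Nat) (hy : y < filled.length) (hx : x < w) :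
    ((((List.range w).map (fun x =>
        windowAll ((filled.map (fun row =>
          windowAll (PySem.List.slice row none (some (w : Int))) (T : Int))).map
          (fun r => r.getD x false)) (T : Int))).getD x []).getD y false = true
      ↔ Gp filled filled.length w T (y : Int) (x : Int)) := by
  rw [PySem.List.getD_map_range _ w x _ hx]
  have hcollen : ((filled.map (fun row =>
      windowAll (PySem.List.slice row none (some (w : Int))) (T : Int))).map
      (fun r => r.getD x false)).length = filled.length := by
    simp
  -- each row's entry: the horizontal window test on that row
  have hcolget : ∀ i : Nat, (hi : i < filled.length) →
      (((filled.map (fun row =>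
          windowAll (PySem.List.slice row none (some (w : Int))) (T : Int))).map
          (fun r => r.getD x false)).getD i false = true ↔
        ∀ b : Int, |b| ≤ (T : Int) → 0 ≤ (x : Int) + b ∧ (x : Int) + b < (w : Int) ∧
          gval filled i ((x : Int) + b).toNat = true) := by
    intro i hi
    have hrowi : w ≤ filled[i].length := hpre filled[i] (List.getElem_mem hi)
    rw [getD_map_map _ _ filled i false hi, PySem.List.slice_to_natCast]
    have hlen : (filled[i].take w).length = w := by
      rw [List.length_take]
      omega
    rw [windowAll_spec _ T x (by omega)]
    have hval : ∀ m : Nat, m < w → ((filled[i].take w).getD m false = filled[i].getD m false) := by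
      intro m hm
      rw [List.getD_eq_getElem?_getD, List.getD_eq_getElem?_getD, List.getElem?_take, if_pos hm]
    constructor
    · intro H b hb
      obtain ⟨c1, c2, c3⟩ := H b hb
      rw [hlen] at c2
      refine ⟨c1, c2, ?_⟩
      rw [hval _ (by omega)] at c3
      unfold gval
      rw [List.getD_eq_getElem _ _ hi]
      exact c3
    · intro H b hb
      obtain ⟨c1, c2, c3⟩ := H b hb
      refine ⟨c1, by rw [hlen]; exact c2, ?_⟩
      rw [hval _ (by omega)]
      unfold gval at c3
      rw [List.getD_eq_getElem _ _ hi] at c3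
      exact c3
  -- the vertical window test over those entries
  rw [windowAll_spec _ T y (by omega), Gp_nested]
  rw [hcollen]
  constructor
  · intro H a ha
    obtain ⟨d1, d2, d3⟩ := H a ha
    refine ⟨d1, d2, ?_⟩
    have hyn : ((y : Int) + a).toNat < filled.length := by omega
    exact fun b hb => (hcolget _ hyn).mp d3 b hb
  · intro H a ha
    obtain ⟨d1, d2, d3⟩ := H a ha
    refine ⟨d1, d2, ?_⟩
    have hyn : ((y : Int) + a).toNat < filled.length := by omega
    exact (hcolget _ hyn).mpr d3

-- ===== VERDICT (by name: the statement is the Claim_ definition above) =====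
theorem outline_from_filled_py_spec : Claim_equal_outline_from_filled_py := by
  intro filled thickness _hdom hpre
  unfold Spec_outline_from_filled_py
  obtain ⟨-, hrows⟩ := hpre
  unfold outline_from_filled_py outline_from_filled_py_alt
  simp only []
  have hmax : (max thickness 0) = ((thickness.toNat : Nat) : Int) := by omega
  rw [hmax]
  apply List.map_congr_left
  intro y hy
  rw [List.mem_range] at hy
  apply List.map_congr_left
  intro x hx
  rw [List.mem_range] at hx
  congr 1
  congr 1
  rw [Bool.eq_iff_iff]
  have hA : gval (pyErode filled thickness) y x = true
      ↔ Gp filled filled.length (filled.headD []).length thickness.toNat (y : Int) (x : Int) := by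
    unfold pyErode
    exact erode_spec filled filled.length (filled.headD []).length thickness.toNat y x hy hx
  have hB := alt_eroded_spec filled (filled.headD []).length thickness.toNat hrows y x hy hx
  unfold gval at hA hB
  rw [hA, hB]
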